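-- pv_equiv track=rewrite | github.com/aghabidareh/MiniPython | Cube Digit Pairs.py | can_form_all_squares
-- ===== SOURCE A (Python) =====
-- def can_form_all_squares(cube1, cube2):
--     # Define all required square numbers
--     squares = ['01', '04', '09', '16', '25', '36', '49', '64', '81']
--
--     # Check if all squares can be formed
--     for square in squares:
--         a, b = square[0], square[1]
--         # Check if a is on cube1 and b is on cube2, or vice versa
--         # Also, consider 6 and 9 as interchangeable
--         if not ((a in cube1 and b in cube2) or (a in cube2 and b in cube1)):
--             # Handle the case where 6 and 9 are interchangeable
--             if (a == '6' or a == '9') and (b == '6' or b == '9'):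
--                 if not ((('6' in cube1 or '9' in cube1) and ('6' in cube2 or '9' in cube2))):
--                     return False
--             else:
--                 return False
--     return True
-- ===== SOURCE B (Python) =====
-- def can_form_all_squares(cube1, cube2):
--     squares = ['01', '04', '09', '16', '25', '36', '49', '64', '81']
--     digits = set('0123456789')
--     # only digit faces matter; build the small set of displayable digit pairs once
--     d1 = set(cube1) & digits
--     d2 = set(cube2) & digits
--     allowed = {(x, y) for x in d1 for y in d2} | {(x, y) for x in d2 for y in d1}
--     return {(sq[0], sq[1]) for sq in squares} <= allowed
-- ===== Notes on version B (the rewrite author's own statement) =====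
-- stated objective: alternative
-- what changed: B filters each cube's faces down to the set of digit faces it carries, builds once the (at most 100) ordered digit pairs the two cubes can display, and answers with a single subset test against the nine squares, replacing A's per-square loop with early returns, repeated two-sided list-membership scans and a dead 6/9-interchange branch (which never fires since no listed square has both digits in {6,9}); same linear cost, a different build-a-table-then-query decomposition.
import Mathlib
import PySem

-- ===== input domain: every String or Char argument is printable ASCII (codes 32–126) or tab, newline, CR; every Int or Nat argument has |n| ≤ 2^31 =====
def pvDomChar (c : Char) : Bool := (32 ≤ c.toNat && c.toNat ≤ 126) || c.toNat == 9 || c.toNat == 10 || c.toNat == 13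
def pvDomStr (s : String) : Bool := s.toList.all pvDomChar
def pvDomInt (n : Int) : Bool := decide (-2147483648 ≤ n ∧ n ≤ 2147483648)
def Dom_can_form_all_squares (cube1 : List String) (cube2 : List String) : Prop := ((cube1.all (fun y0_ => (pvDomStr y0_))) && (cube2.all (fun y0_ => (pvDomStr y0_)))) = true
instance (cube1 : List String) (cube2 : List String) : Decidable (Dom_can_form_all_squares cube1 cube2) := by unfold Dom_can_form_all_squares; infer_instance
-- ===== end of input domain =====

-- B keeps only the digit faces of each cube as sets, builds the set of displayable digit pairs
-- once, and answers with one subset test over the nine squares (alternative decomposition,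
-- same cost; A's 6/9-interchange branch is dead code for these nine squares).
-- ===== PORT A =====
-- the nine squares with a = square[0], b = square[1] precomputed from the 2-char literals (exact)
def pvSquares : List (String × String) :=
  [("0","1"),("0","4"),("0","9"),("1","6"),("2","5"),("3","6"),("4","9"),("6","4"),("8","1")]

-- the 'for square in squares' loop with early returns
def pvLoopA (cube1 : List String) (cube2 : List String) : List (String × String) → Bool
  | [] => true
  | (a, b) :: rest =>
    if !((cube1.contains a && cube2.contains b) || (cube2.contains a && cube1.contains b)) then
      if (a == "6" || a == "9") && (b == "6" || b == "9") then
        if !((cube1.contains "6" || cube1.contains "9") && (cube2.contains "6" || cube2.contains "9")) then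
          false
        else
          pvLoopA cube1 cube2 rest
      else
        false
    else
      pvLoopA cube1 cube2 rest

def can_form_all_squares (cube1 : List String) (cube2 : List String) : Bool :=
  pvLoopA cube1 cube2 pvSquares

-- ===== PORT B =====
-- set('0123456789'): the ten digit characters as one-char strings (exact for this literal)
def pvDigits : PySem.Set String :=
  PySem.Set.ofList ["0","1","2","3","4","5","6","7","8","9"]

def can_form_all_squares_alt (cube1 : List String) (cube2 : List String) : Bool :=
  let d1 := PySem.Set.inter (PySem.Set.ofList cube1) pvDigits
  let d2 := PySem.Set.inter (PySem.Set.ofList cube2) pvDigits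
  -- set comprehensions over sets, consumed only as a set (order-independent): Set.ofList of the products
  let allowed := PySem.Set.union (PySem.Set.ofList (d1.flatMap fun x => d2.map fun y => (x, y)))
                                 (d2.flatMap fun x => d1.map fun y => (x, y))
  -- {(sq[0], sq[1]) for sq in squares} with the 2-char literals precomputed as pairs (exact)
  PySem.Set.issubset (PySem.Set.ofList pvSquares) allowed

-- ===== PRECONDITION & SPEC =====
def Spec_can_form_all_squares (cube1 : List String) (cube2 : List String) (out : Bool) : Prop := out = can_form_all_squares_alt cube1 cube2
instance (cube1 : List String) (cube2 : List String) (out : Bool) : Decidable (Spec_can_form_all_squares cube1 cube2 out) := by unfold Spec_can_form_all_squares; infer_instance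

-- ===== CLAIM (what is proved, stated in full; the proofs are below) =====
def Claim_equal_can_form_all_squares : Prop := ∀ (cube1 : List String) (cube2 : List String), Dom_can_form_all_squares cube1 cube2 → Spec_can_form_all_squares cube1 cube2 (can_form_all_squares cube1 cube2)

-- ===== LEMMAS AND PROOFS =====

-- the two-sided membership condition for one square pair
def pvGood (cube1 cube2 : List String) (p : String × String) : Prop :=
  (p.1 ∈ cube1 ∧ p.2 ∈ cube2) ∨ (p.1 ∈ cube2 ∧ p.2 ∈ cube1)

-- one loop iteration, for a square whose digits are not both in {6,9}: the dead branch drops out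
theorem pv_loopA_step (cube1 cube2 : List String) (a b : String)
    (rest : List (String × String))
    (h : ((a == "6" || a == "9") && (b == "6" || b == "9")) = false) :
    pvLoopA cube1 cube2 ((a, b) :: rest)
    = (((cube1.contains a && cube2.contains b) || (cube2.contains a && cube1.contains b))
        && pvLoopA cube1 cube2 rest) := by
  cases hc : ((cube1.contains a && cube2.contains b) || (cube2.contains a && cube1.contains b)) <;>
    (simp only [pvLoopA]; rw [hc]; try rw [h]) <;> simp

theorem pv_A_iff (cube1 cube2 : List String) :
    can_form_all_squares cube1 cube2 = true ↔ ∀ p ∈ pvSquares, pvGood cube1 cube2 p := by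
  unfold can_form_all_squares pvSquares
  rw [pv_loopA_step _ _ _ _ _ (by decide), pv_loopA_step _ _ _ _ _ (by decide),
      pv_loopA_step _ _ _ _ _ (by decide), pv_loopA_step _ _ _ _ _ (by decide),
      pv_loopA_step _ _ _ _ _ (by decide), pv_loopA_step _ _ _ _ _ (by decide),
      pv_loopA_step _ _ _ _ _ (by decide), pv_loopA_step _ _ _ _ _ (by decide),
      pv_loopA_step _ _ _ _ _ (by decide)]
  simp [pvLoopA, pvGood, List.forall_mem_cons]

theorem pv_mem_d (c : List String) (x : String) :
    x ∈ PySem.Set.inter (PySem.Set.ofList c) pvDigits ↔ x ∈ c ∧ x ∈ pvDigits := by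
  rw [PySem.Set.mem_inter, PySem.Set.mem_ofList]

theorem pv_mem_allowed (cube1 cube2 : List String) (p : String × String)
    (ha : p.1 ∈ pvDigits) (hb : p.2 ∈ pvDigits) :
    p ∈ PySem.Set.union
          (PySem.Set.ofList ((PySem.Set.inter (PySem.Set.ofList cube1) pvDigits).flatMap fun x =>
            (PySem.Set.inter (PySem.Set.ofList cube2) pvDigits).map fun y => (x, y)))
          ((PySem.Set.inter (PySem.Set.ofList cube2) pvDigits).flatMap fun x =>
            (PySem.Set.inter (PySem.Set.ofList cube1) pvDigits).map fun y => (x, y))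
      ↔ pvGood cube1 cube2 p := by
  obtain ⟨a, b⟩ := p
  simp only [pvGood]
  constructor
  · intro h
    rcases (PySem.Set.mem_union _ _ _).mp h with h | h
    · obtain ⟨x, hx, hm⟩ := List.mem_flatMap.mp ((PySem.Set.mem_ofList _ _).mp h)
      obtain ⟨y, hy, he⟩ := List.mem_map.mp hm
      injection he with h1 h2; subst h1; subst h2
      exact Or.inl ⟨((pv_mem_d _ _).mp hx).1, ((pv_mem_d _ _).mp hy).1⟩
    · obtain ⟨x, hx, hm⟩ := List.mem_flatMap.mp h
      obtain ⟨y, hy, he⟩ := List.mem_map.mp hm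
      injection he with h1 h2; subst h1; subst h2
      exact Or.inr ⟨((pv_mem_d _ _).mp hx).1, ((pv_mem_d _ _).mp hy).1⟩
  · intro h
    apply (PySem.Set.mem_union _ _ _).mpr
    rcases h with ⟨h1, h2⟩ | ⟨h1, h2⟩
    · exact Or.inl ((PySem.Set.mem_ofList _ _).mpr (List.mem_flatMap.mpr
        ⟨a, (pv_mem_d _ _).mpr ⟨h1, ha⟩,
         List.mem_map.mpr ⟨b, (pv_mem_d _ _).mpr ⟨h2, hb⟩, rfl⟩⟩))
    · exact Or.inr (List.mem_flatMap.mpr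
        ⟨a, (pv_mem_d _ _).mpr ⟨h1, ha⟩,
         List.mem_map.mpr ⟨b, (pv_mem_d _ _).mpr ⟨h2, hb⟩, rfl⟩⟩)

theorem pv_B_iff (cube1 cube2 : List String) :
    can_form_all_squares_alt cube1 cube2 = true ↔ ∀ p ∈ pvSquares, pvGood cube1 cube2 p := by
  have hd : ∀ p ∈ pvSquares, p.1 ∈ pvDigits ∧ p.2 ∈ pvDigits := by decide
  unfold can_form_all_squares_alt
  rw [PySem.Set.issubset_iff]
  constructor
  · intro h p hp
    exact (pv_mem_allowed cube1 cube2 p (hd p hp).1 (hd p hp).2).mp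
      (h p ((PySem.Set.mem_ofList _ _).mpr hp))
  · intro h p hp
    have hp' := (PySem.Set.mem_ofList _ _).mp hp
    exact (pv_mem_allowed cube1 cube2 p (hd p hp').1 (hd p hp').2).mpr (h p hp')

-- ===== VERDICT =====
theorem can_form_all_squares_spec : Claim_equal_can_form_all_squares := by
  intro cube1 cube2 _
  unfold Spec_can_form_all_squares
  rw [Bool.eq_iff_iff, pv_A_iff, pv_B_iff]
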